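-- pv_equiv track=rewrite | github.com/coralynnkc/cs329-group | grammaticality-2.0/scripts/score_blimp.py | detect_option_col
-- ===== SOURCE A (Python) =====
-- ID_VARIANTS = {"pair_id", "id", "item_id", "row_id"}
--
-- OPTION_VARIANTS = {
--     "predicted_option",
--     "prediction",
--     "label",
--     "pred",
--     "answer",
--     "output",
--     "choice",
-- }
--
-- def detect_option_col(rows):
--     for col in rows[0].keys():
--         if col.strip().lower() in OPTION_VARIANTS:
--             return col
--     for col in rows[0].keys():
--         if col.strip().lower() not in ID_VARIANTS:
--             return col
--     raise ValueError(f"Could not detect prediction option column from {list(rows[0].keys())}")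
-- ===== SOURCE B (Python) =====
-- ID_VARIANTS = {"pair_id", "id", "item_id", "row_id"}
--
-- OPTION_VARIANTS = {
--     "predicted_option",
--     "prediction",
--     "label",
--     "pred",
--     "answer",
--     "output",
--     "choice",
-- }
--
--
-- def _rank(col):
--     n = col.strip().lower()
--     if n in OPTION_VARIANTS:
--         return 0
--     if n not in ID_VARIANTS:
--         return 1
--     return 2
--
--
-- def detect_option_col(rows):
--     keys = list(rows[0].keys())
--     triples = [(_rank(c), i, c) for i, c in enumerate(keys)]
--     if triples:
--         best = min(triples)
--         if best[0] < 2: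
--             return best[2]
--     raise ValueError(f"Could not detect prediction option column from {list(rows[0].keys())}")
-- ===== Notes on version B (the rewrite author's own statement) =====
-- stated objective: alternative
-- what changed: Replaces A's two sequential scans over the keys with a rank-and-argmin scheme: each key is mapped to a priority (0 = option variant, 1 = other, 2 = id variant) and the lexicographic minimum of (rank, index, key) picks the answer in one min() call.
import Mathlib
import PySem

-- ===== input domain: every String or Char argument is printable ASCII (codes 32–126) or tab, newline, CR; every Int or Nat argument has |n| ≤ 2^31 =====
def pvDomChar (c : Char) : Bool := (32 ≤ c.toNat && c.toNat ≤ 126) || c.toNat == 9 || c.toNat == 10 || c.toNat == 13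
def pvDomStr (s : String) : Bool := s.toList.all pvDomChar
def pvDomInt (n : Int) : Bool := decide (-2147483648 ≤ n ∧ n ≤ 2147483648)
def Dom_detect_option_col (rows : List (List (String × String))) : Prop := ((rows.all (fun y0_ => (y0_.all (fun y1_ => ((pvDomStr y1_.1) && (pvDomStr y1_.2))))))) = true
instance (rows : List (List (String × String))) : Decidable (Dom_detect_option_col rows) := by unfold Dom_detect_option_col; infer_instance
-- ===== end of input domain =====

-- B replaces A's two sequential key scans with a rank-and-argmin scheme (alternative algorithm of the same cost).


def pvIdVariants : List String := ["pair_id", "id", "item_id", "row_id"]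

def pvOptionVariants : List String :=
  ["predicted_option", "prediction", "label", "pred", "answer", "output", "choice"]

def pvNorm (s : String) : String := PySem.Str.lower (PySem.Str.strip s)

-- ===== PORT A =====
-- first scan: first key whose normalization is an option variant
def pvScanOption : List String → Option String
  | [] => none
  | c :: rest => if pvNorm c ∈ pvOptionVariants then some c else pvScanOption rest

-- second scan: first key whose normalization is not an id variant
def pvScanNonId : List String → Option String
  | [] => none
  | c :: rest => if pvNorm c ∉ pvIdVariants then some c else pvScanNonId rest

-- rows[0].keys(): distinct keys of the association list, insertion order
def detect_option_col (rows : List (List (String × String))) : String :=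
  let keys := PySem.List.dedup ((rows.headD []).map Prod.fst)
  match pvScanOption keys with
  | some c => c
  | none =>
    match pvScanNonId keys with
    | some c => c
    | none => ""  -- Python raises ValueError here; excluded by Pre_

-- ===== PORT B =====
-- _rank: 0 = option variant, 1 = ordinary, 2 = id variant
def pvRank (col : String) : Int :=
  let n := pvNorm col
  if n ∈ pvOptionVariants then 0
  else if n ∉ pvIdVariants then 1
  else 2

-- [(_rank(c), i, c) for i, c in enumerate(keys)]
def pvEnumTriples (i : Int) : List String → List (Int × Int × String)
  | [] => []
  | c :: ks => (pvRank c, i, c) :: pvEnumTriples (i + 1) ks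

-- min(): left fold keeping the first lexicographically smallest tuple.
-- The indices are pairwise distinct, so Python's tuple comparison never
-- reaches the third (string) component; the step compares (rank, index).
def pvStep (acc u : Int × Int × String) : Int × Int × String :=
  if u.1 < acc.1 ∨ (u.1 = acc.1 ∧ u.2.1 < acc.2.1) then u else acc

def detect_option_col_alt (rows : List (List (String × String))) : String :=
  let keys := PySem.List.dedup ((rows.headD []).map Prod.fst)
  match pvEnumTriples 0 keys with
  | [] => ""  -- Python raises ValueError here; excluded by Pre_
  | t :: ts =>
    let best := ts.foldl pvStep t
    if best.1 < 2 then best.2.2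
    else ""  -- Python raises ValueError here; excluded by Pre_

-- ===== PRECONDITION & SPEC =====
-- Pre_ excludes exactly the inputs where A raises: empty rows (IndexError) and
-- first rows whose keys all normalize to id variants (ValueError).
def Pre_detect_option_col (rows : List (List (String × String))) : Prop :=
  rows ≠ [] ∧ ∃ p ∈ rows.headD [], pvNorm p.1 ∉ pvIdVariants
instance (rows : List (List (String × String))) : Decidable (Pre_detect_option_col rows) := by
  unfold Pre_detect_option_col; infer_instance

def pvWitness_detect_option_col : (List (List (String × String))) := [[("prediction", "A")]]

def Spec_detect_option_col (rows : List (List (String × String))) (out : String) : Prop := out = detect_option_col_alt rows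
instance (rows : List (List (String × String))) (out : String) : Decidable (Spec_detect_option_col rows out) := by unfold Spec_detect_option_col; infer_instance

-- ===== CLAIM (what is proved, stated in full; the proofs are below) =====
def Claim_equal_detect_option_col : Prop := ∀ (rows : List (List (String × String))), Dom_detect_option_col rows → Pre_detect_option_col rows → Spec_detect_option_col rows (detect_option_col rows)

-- ===== LEMMAS AND PROOFS =====
set_option maxHeartbeats 1000000
theorem pvRank_mem (c : String) : 0 ≤ pvRank c ∧ pvRank c ≤ 2 := by
  unfold pvRank; dsimp only; split_ifs <;> omega

-- Characterization of B's fold in terms of A's two scans; the second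
-- components of the enumerated triples all exceed t's index, so ties on
-- rank are always resolved in favour of the accumulator.
theorem pvFold_char (keys : List String) (n : Int) (t : Int × Int × String)
    (hlt : t.2.1 < n) (h0 : 0 ≤ t.1) (h2 : t.1 ≤ 2) :
    (((pvEnumTriples n keys).foldl pvStep t).1,
     ((pvEnumTriples n keys).foldl pvStep t).2.2) =
      (if t.1 = 0 then (t.1, t.2.2)
       else
         match pvScanOption keys with
         | some c => (0, c)
         | none =>
           if t.1 = 1 then (t.1, t.2.2)
           else
             match pvScanNonId keys with
             | some c => (1, c)
             | none => (t.1, t.2.2)) := by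
  induction keys generalizing n t with
  | nil =>
    simp only [pvEnumTriples, List.foldl, pvScanOption, pvScanNonId]
    split_ifs <;> rfl
  | cons c ks ih =>
    simp only [pvEnumTriples, List.foldl]
    obtain ⟨r, hr⟩ : ∃ r, pvRank c = r := ⟨_, rfl⟩
    rw [hr]
    by_cases hop : pvNorm c ∈ pvOptionVariants
    · -- rank c = 0
      have hrc : r = 0 := by rw [← hr]; simp [pvRank, hop]
      have hso : pvScanOption (c :: ks) = some c := by
        simp only [pvScanOption, if_pos hop]
      subst hrc
      by_cases ht0 : t.1 = 0
      · -- tie on rank 0: accumulator wins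
        have hstep : pvStep t (0, n, c) = t := by
          simp only [pvStep]; rw [if_neg]; rintro (h | ⟨h1, h2⟩) <;> omega
        rw [hstep, ih (n + 1) t (by omega) h0 h2, if_pos ht0, if_pos ht0]
      · -- new minimum
        have hstep : pvStep t (0, n, c) = (0, n, c) := by
          simp only [pvStep]; rw [if_pos]; left; omega
        rw [hstep, ih (n + 1) (0, n, c) (by simp) (by simp) (by norm_num),
          if_neg ht0, hso]
        norm_num
    · have hso : pvScanOption (c :: ks) = pvScanOption ks := by
        simp only [pvScanOption, if_neg hop]
      by_cases hid : pvNorm c ∈ pvIdVariants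
      · -- rank c = 2: never displaces the accumulator
        have hrc : r = 2 := by rw [← hr]; simp [pvRank, hop, hid]
        have hsn : pvScanNonId (c :: ks) = pvScanNonId ks := by
          simp only [pvScanNonId]; rw [if_neg (by simpa using hid)]
        subst hrc
        have hstep : pvStep t (2, n, c) = t := by
          simp only [pvStep]; rw [if_neg]; rintro (h | ⟨h1, h2⟩) <;> omega
        rw [hstep, ih (n + 1) t (by omega) h0 h2, hso, hsn]
      · -- rank c = 1
        have hrc : r = 1 := by rw [← hr]; simp [pvRank, hop, hid]
        have hsn : pvScanNonId (c :: ks) = some c := by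
          simp only [pvScanNonId]; rw [if_pos hid]
        subst hrc
        rw [hso, hsn]
        by_cases ht0 : t.1 = 0
        · have hstep : pvStep t (1, n, c) = t := by
            simp only [pvStep]; rw [if_neg]; rintro (h | ⟨h1, h2⟩) <;> omega
          rw [hstep, ih (n + 1) t (by omega) h0 h2, if_pos ht0, if_pos ht0]
        · by_cases ht1 : t.1 = 1
          · -- tie on rank 1: accumulator wins
            have hstep : pvStep t (1, n, c) = t := by
              simp only [pvStep]; rw [if_neg]; rintro (h | ⟨h1, h2⟩) <;> omega
            rw [hstep, ih (n + 1) t (by omega) h0 h2, if_neg ht0, if_neg ht0]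
            cases pvScanOption ks with
            | some c' => rfl
            | none => simp only [if_pos ht1]
          · -- t.1 = 2: the new rank-1 triple displaces the accumulator
            have hstep : pvStep t (1, n, c) = (1, n, c) := by
              simp only [pvStep]; rw [if_pos]; left; omega
            rw [hstep, ih (n + 1) (1, n, c) (by simp) (by norm_num) (by norm_num),
              if_neg ht0]
            cases pvScanOption ks with
            | some c' => rfl
            | none => simp only [if_neg ht1]; norm_num

theorem pvFinish (keys : List String) :
    (match pvScanOption keys with
     | some c => c
     | none =>
       match pvScanNonId keys with
       | some c => c
       | none => "") =
    (match pvEnumTriples 0 keys with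
     | [] => ""
     | t :: ts =>
       let best := ts.foldl pvStep t
       if best.1 < 2 then best.2.2 else "") := by
  cases keys with
  | nil => rfl
  | cons c ks =>
    show _ = (let best := (pvEnumTriples (0 + 1) ks).foldl pvStep (pvRank c, 0, c)
              if best.1 < 2 then best.2.2 else "")
    rw [show ((0 : Int) + 1) = 1 from rfl]
    obtain ⟨r, hr⟩ : ∃ r, pvRank c = r := ⟨_, rfl⟩
    rw [hr]
    have hn0 : (0 : Int) ≤ r := hr ▸ (pvRank_mem c).1
    have hn2 : r ≤ 2 := hr ▸ (pvRank_mem c).2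
    have h := pvFold_char ks 1 (r, 0, c) (by norm_num) (by simpa using hn0) (by simpa using hn2)
    obtain ⟨best, hb⟩ : ∃ b, (pvEnumTriples 1 ks).foldl pvStep (r, 0, c) = b := ⟨_, rfl⟩
    rw [hb] at h
    show _ = (if ((pvEnumTriples 1 ks).foldl pvStep (r, 0, c)).1 < 2
              then ((pvEnumTriples 1 ks).foldl pvStep (r, 0, c)).2.2 else "")
    rw [hb]
    by_cases hop : pvNorm c ∈ pvOptionVariants
    · have hrc : r = 0 := by rw [← hr]; simp [pvRank, hop]
      subst hrc
      norm_num at h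
      obtain ⟨h1, h2⟩ := h
      simp only [pvScanOption, if_pos hop, h1, h2]
      norm_num
    · have hso : pvScanOption (c :: ks) = pvScanOption ks := by
        simp only [pvScanOption, if_neg hop]
      rw [hso]
      by_cases hid : pvNorm c ∈ pvIdVariants
      · -- rank c = 2
        have hrc : r = 2 := by rw [← hr]; simp [pvRank, hop, hid]
        subst hrc
        have hsn : pvScanNonId (c :: ks) = pvScanNonId ks := by
          simp only [pvScanNonId]; rw [if_neg (by simpa using hid)]
        rw [hsn]
        norm_num at h
        cases hsoks : pvScanOption ks with
        | some c' =>
          rw [hsoks] at h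
          have h1 : best.1 = 0 := congrArg Prod.fst h
          have h2 : best.2.2 = c' := congrArg (fun p => p.2) h
          simp [h1, h2]
        | none =>
          rw [hsoks] at h
          cases hsnks : pvScanNonId ks with
          | some c' =>
            rw [hsnks] at h
            have h1 : best.1 = 1 := congrArg Prod.fst h
            have h2 : best.2.2 = c' := congrArg (fun p => p.2) h
            simp [h1, h2]
          | none =>
            rw [hsnks] at h
            have h1 : best.1 = 2 := congrArg Prod.fst h
            simp [h1]
      · -- rank c = 1
        have hrc : r = 1 := by rw [← hr]; simp [pvRank, hop, hid]
        subst hrc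
        have hsn : pvScanNonId (c :: ks) = some c := by
          simp only [pvScanNonId]; rw [if_pos hid]
        rw [hsn]
        norm_num at h
        cases hsoks : pvScanOption ks with
        | some c' =>
          rw [hsoks] at h
          have h1 : best.1 = 0 := congrArg Prod.fst h
          have h2 : best.2.2 = c' := congrArg (fun p => p.2) h
          simp [h1, h2]
        | none =>
          rw [hsoks] at h
          have h1 : best.1 = 1 := congrArg Prod.fst h
          have h2 : best.2.2 = c := congrArg (fun p => p.2) h
          simp [h1, h2]

theorem detect_option_col_eq (rows : List (List (String × String))) :
    detect_option_col rows = detect_option_col_alt rows :=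
  pvFinish (PySem.List.dedup ((rows.headD []).map Prod.fst))

-- ===== VERDICT (by name: the statement is the Claim_ definition above) =====
theorem detect_option_col_spec : Claim_equal_detect_option_col := by
  intro rows _ _
  show detect_option_col rows = detect_option_col_alt rows
  exact detect_option_col_eq rows
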